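-- pv_equiv track=rewrite | github.com/akoshochrein/rake | src/core.py | get_keyword_matrix
-- ===== SOURCE A (Python) =====
-- from collections import defaultdict
--
-- def get_keyword_matrix(candidates):
--     keyword_matrix = defaultdict(list)
--     for candidate in candidates:
--         words = candidate.split(' ')
--         for word in words:
--             keyword_matrix[word] += words
--
--     deg_freq_by_keyword = {
--         keyword: {
--             'freq': len(vertices),
--             'deg': vertices.count(keyword)
--         } for keyword, vertices in keyword_matrix.items()
--     }
--
--     return deg_freq_by_keyword
-- ===== SOURCE B (Python) =====
-- from collections import Counter
--
-- def get_keyword_matrix(candidates):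
--     # Per candidate, each word occurring c times in a candidate of length L
--     # contributes c*L to its 'freq' and c*c to its 'deg'; no vertex lists are built.
--     totals = {}
--     for candidate in candidates:
--         words = candidate.split(' ')
--         length = len(words)
--         for word, c in Counter(words).items():
--             f, d = totals.get(word, (0, 0))
--             totals[word] = (f + c * length, d + c * c)
--     return {word: {'freq': f, 'deg': d} for word, (f, d) in totals.items()}
-- ===== Notes on version B (the rewrite author's own statement) =====
-- stated objective: alternative
-- what changed: Instead of materialising, per word occurrence, the concatenated vertex list and then scanning it with len/count, B keeps per-word running (freq, deg) totals and adds c*L and c*c from a per-candidate Counter.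
import Mathlib
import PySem

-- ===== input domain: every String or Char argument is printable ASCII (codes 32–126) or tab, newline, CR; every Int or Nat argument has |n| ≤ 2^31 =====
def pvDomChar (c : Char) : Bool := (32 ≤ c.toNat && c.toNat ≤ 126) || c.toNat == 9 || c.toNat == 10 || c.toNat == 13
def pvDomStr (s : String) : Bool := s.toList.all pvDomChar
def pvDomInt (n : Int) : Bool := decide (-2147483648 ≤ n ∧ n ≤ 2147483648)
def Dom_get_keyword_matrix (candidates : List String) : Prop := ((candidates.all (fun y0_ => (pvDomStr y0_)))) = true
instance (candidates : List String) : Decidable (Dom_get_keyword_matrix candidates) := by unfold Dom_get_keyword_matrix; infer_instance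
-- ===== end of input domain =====

-- B replaces A's per-occurrence list concatenation + len/count scans with per-word running totals
-- (freq += c*L, deg += c*c from a per-candidate Counter), building no vertex lists (objective: alternative).

-- s.split(' ') with the literal nonempty separator ' ' (split? is none only for an empty separator)
def pySplitSpace (s : String) : List String := (PySem.Str.split? s " ").getD []

-- ===== PORT A =====
def get_keyword_matrix (candidates : List String) : List (String × List (String × Int)) :=
  let keyword_matrix : PySem.Dict String (List String) :=
    candidates.foldl (fun km candidate =>
      let words := pySplitSpace candidate
      words.foldl (fun km word => km.modify word [] (· ++ words)) km)
      PySem.Dict.empty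
  keyword_matrix.items.map (fun p =>
    (p.1, [("freq", (p.2.length : Int)), ("deg", (p.2.count p.1 : Int))]))

-- ===== PORT B =====
def get_keyword_matrix_alt (candidates : List String) : List (String × List (String × Int)) :=
  let totals : PySem.Dict String (Int × Int) :=
    candidates.foldl (fun t candidate =>
      let words := pySplitSpace candidate
      let length : Int := (words.length : Int)
      (PySem.Dict.counter words).items.foldl (fun t wc =>
        let fd := t.getD wc.1 (0, 0)
        t.insert wc.1 (fd.1 + wc.2 * length, fd.2 + wc.2 * wc.2)) t)
      PySem.Dict.empty
  totals.items.map (fun p => (p.1, [("freq", p.2.1), ("deg", p.2.2)]))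

-- ===== PRECONDITION & SPEC =====
def Spec_get_keyword_matrix (candidates : List String) (out : List (String × List (String × Int))) : Prop := out = get_keyword_matrix_alt candidates
instance (candidates : List String) (out : List (String × List (String × Int))) : Decidable (Spec_get_keyword_matrix candidates out) := by unfold Spec_get_keyword_matrix; infer_instance

-- ===== CLAIM (what is proved, stated in full; the proofs are below) =====
def Claim_equal_get_keyword_matrix : Prop := ∀ (candidates : List String), Dom_get_keyword_matrix candidates → Spec_get_keyword_matrix candidates (get_keyword_matrix candidates)

-- ===== LEMMAS AND PROOFS =====

-- A's inner loop: appending `ws` once per occurrence of `k` in `l` adds `l.count k * ws.length`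
-- to the stored list's length and `l.count k * ws.count k` to its count of `k`.
theorem a_inner (ws : List String) (l : List String) :
    ∀ (d : PySem.Dict String (List String)) (k : String),
      ((l.foldl (fun d w => d.modify w [] (· ++ ws)) d).getD k []).length
          = (d.getD k []).length + l.count k * ws.length
      ∧ ((l.foldl (fun d w => d.modify w [] (· ++ ws)) d).getD k []).count k
          = (d.getD k []).count k + l.count k * ws.count k := by
  induction l with
  | nil => intro d k; simp
  | cons w l ih =>
    intro d k
    have h := ih (d.modify w [] (· ++ ws)) k
    simp only [List.foldl_cons] at *
    rcases h with ⟨h1, h2⟩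
    rw [h1, h2, PySem.Dict.getD_modify, List.count_cons]
    by_cases hk : k = w
    · subst hk; simp [List.count_append]; constructor <;> ring
    · simp [hk, Ne.symm hk]

-- find? (· == k) on a list returns `k` iff `k` is a member.
theorem find?_beq_of_mem {l : List String} {k : String} (h : k ∈ l) :
    l.find? (fun x => x == k) = some k := by
  induction l with
  | nil => cases h
  | cons a l ih =>
    by_cases ha : a = k
    · subst ha; simp [List.find?]
    · have hb : (a == k) = false := by simpa using ha
      simp only [List.mem_cons] at h
      rcases h with h | h
      · exact absurd h.symm ha
      · simp only [List.find?, hb]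
        exact ih h

-- B's inner loop over distinct keys: the final value at `k` is the single update for `k`, if any.
theorem b_inner (L : Int) (l : List (String × Int)) :
    ∀ (t : PySem.Dict String (Int × Int)) (k : String), (l.map Prod.fst).Nodup →
      (l.foldl (fun t wc =>
          t.insert wc.1 ((t.getD wc.1 (0, 0)).1 + wc.2 * L, (t.getD wc.1 (0, 0)).2 + wc.2 * wc.2)) t).getD k (0, 0)
        = match l.find? (fun wc => wc.1 == k) with
          | some wc => ((t.getD k (0, 0)).1 + wc.2 * L, (t.getD k (0, 0)).2 + wc.2 * wc.2)
          | none => t.getD k (0, 0) := by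
  induction l with
  | nil => intro t k _; simp
  | cons wc l ih =>
    intro t k hnd
    simp only [List.map_cons, List.nodup_cons] at hnd
    simp only [List.foldl_cons]
    rw [ih _ k hnd.2]
    by_cases hk : wc.1 = k
    · have hnone : l.find? (fun wc' => wc'.1 == k) = none := by
        apply List.find?_eq_none.mpr
        intro p hp
        have hne : p.1 ≠ k := by
          intro hpk
          exact hnd.1 (by rw [hk, ← hpk]; exact List.mem_map_of_mem hp)
        simpa using hne
      have hbeq : (wc.1 == k) = true := by simpa using hk
      subst hk
      simp [hnone, List.find?, PySem.Dict.getD_insert_self]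
    · have hbeq : (wc.1 == k) = false := by simpa using hk
      simp [List.find?, hbeq, PySem.Dict.getD_insert, Ne.symm hk]

-- updating with a deduplicated list updates with the list itself
theorem set_update_ofList (s : List String) (xs : List String) :
    PySem.Set.update s (PySem.Set.ofList xs) = PySem.Set.update s xs := by
  rw [PySem.Set.update_eq_append_filter, PySem.Set.update_eq_append_filter, PySem.Set.ofList_ofList]

-- The invariant: after any number of candidates, A's dict and B's dict have the same keys,
-- and B stores exactly (length, count-of-key) of A's stored vertex list.
theorem main_inv (cs : List String) :
    ∀ (km : PySem.Dict String (List String)) (t : PySem.Dict String (Int × Int)),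
      km.keys = t.keys → km.keys.Nodup →
      (∀ k, t.getD k (0, 0) = (((km.getD k []).length : Int), ((km.getD k []).count k : Int))) →
      (cs.foldl (fun km candidate =>
          (pySplitSpace candidate).foldl
            (fun km word => km.modify word [] (· ++ pySplitSpace candidate)) km) km).keys
        = (cs.foldl (fun t candidate =>
            (PySem.Dict.counter (pySplitSpace candidate)).items.foldl (fun t wc =>
              t.insert wc.1 ((t.getD wc.1 (0, 0)).1 + wc.2 * ((pySplitSpace candidate).length : Int),
                (t.getD wc.1 (0, 0)).2 + wc.2 * wc.2)) t) t).keys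
      ∧ (cs.foldl (fun km candidate =>
          (pySplitSpace candidate).foldl
            (fun km word => km.modify word [] (· ++ pySplitSpace candidate)) km) km).keys.Nodup
      ∧ ∀ k, (cs.foldl (fun t candidate =>
            (PySem.Dict.counter (pySplitSpace candidate)).items.foldl (fun t wc =>
              t.insert wc.1 ((t.getD wc.1 (0, 0)).1 + wc.2 * ((pySplitSpace candidate).length : Int),
                (t.getD wc.1 (0, 0)).2 + wc.2 * wc.2)) t) t).getD k (0, 0)
          = ((((cs.foldl (fun km candidate =>
              (pySplitSpace candidate).foldl
                (fun km word => km.modify word [] (· ++ pySplitSpace candidate)) km) km).getD k []).length : Int),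
             (((cs.foldl (fun km candidate =>
              (pySplitSpace candidate).foldl
                (fun km word => km.modify word [] (· ++ pySplitSpace candidate)) km) km).getD k []).count k : Int)) := by
  induction cs with
  | nil => intro km t h1 h2 h3; exact ⟨h1, h2, h3⟩
  | cons c cs ih =>
    intro km t h1 h2 h3
    simp only [List.foldl_cons]
    set ws := pySplitSpace c with hws
    set km1 := ws.foldl (fun km word => km.modify word [] (· ++ ws)) km with hkm1
    set t1 := (PySem.Dict.counter ws).items.foldl (fun t wc =>
      t.insert wc.1 ((t.getD wc.1 (0, 0)).1 + wc.2 * (ws.length : Int),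
        (t.getD wc.1 (0, 0)).2 + wc.2 * wc.2)) t with ht1
    -- keys of the one-candidate updates
    have hkmkeys : km1.keys = PySem.Set.update km.keys ws := by
      rw [hkm1, PySem.Dict.keys_foldl_modify]
    have hmapfst : (PySem.Dict.counter ws).items.map Prod.fst = PySem.Set.ofList ws := by
      have := PySem.Dict.keys_counter (xs := ws)
      simpa [PySem.Dict.keys] using this
    have htkeys : t1.keys = PySem.Set.update t.keys ws := by
      rw [ht1, PySem.Dict.keys_foldl_insert_key (key := Prod.fst), hmapfst, set_update_ofList]
    refine ih km1 t1 ?_ ?_ ?_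
    · rw [hkmkeys, htkeys, h1]
    · rw [hkmkeys]; exact PySem.Set.nodup_update _ _ h2
    · intro k
      have hb := b_inner (ws.length : Int) (PySem.Dict.counter ws).items t k
        (by rw [hmapfst]; exact PySem.Set.nodup_ofList ws)
      have ha := a_inner ws ws km k
      have hfind : (PySem.Dict.counter ws).items.find? (fun wc => wc.1 == k)
          = ((PySem.Set.ofList ws).find? (fun x => x == k)).map
              (fun x => (x, (ws.count x : Int))) := by
        rw [PySem.Dict.items_counter, List.find?_map]
        rfl
      rw [ht1, hb, hkm1]
      rcases ha with ⟨hlen, hcnt⟩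
      by_cases hmem : k ∈ ws
      · have : (PySem.Set.ofList ws).find? (fun x => x == k) = some k :=
          find?_beq_of_mem ((PySem.Set.mem_ofList _ _).mpr hmem)
        rw [hfind, this]
        simp only [Option.map_some]
        rw [h3 k, hlen, hcnt]
        push_cast
        ring_nf
      · have hzero : ws.count k = 0 := List.count_eq_zero.mpr (fun h => hmem (by simpa using h))
        have : (PySem.Set.ofList ws).find? (fun x => x == k) = none := by
          apply List.find?_eq_none.mpr
          intro x hx
          have : x ≠ k := fun hxk => hmem (hxk ▸ (PySem.Set.mem_ofList _ _).mp hx)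
          simpa using this
        rw [hfind, this]
        simp only [Option.map_none]
        rw [h3 k, hlen, hcnt, hzero]
        simp

-- ===== VERDICT (by name: the statement is the Claim_ definition above) =====
theorem get_keyword_matrix_spec : Claim_equal_get_keyword_matrix := by
  unfold Claim_equal_get_keyword_matrix
  intro cs _
  unfold Spec_get_keyword_matrix
  simp only [get_keyword_matrix, get_keyword_matrix_alt]
  obtain ⟨hk, hnd, hv⟩ := main_inv cs PySem.Dict.empty PySem.Dict.empty
    (by simp [PySem.Dict.keys_empty]) (by simp [PySem.Dict.keys_empty])
    (by intro k; simp [PySem.Dict.getD_empty])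
  rw [PySem.Dict.items_eq_map_keys _ hnd [],
    PySem.Dict.items_eq_map_keys _ (hk ▸ hnd) ((0 : Int), (0 : Int)), ← hk,
    List.map_map, List.map_map]
  apply List.map_congr_left
  intro k _
  simp only [Function.comp]
  rw [hv k]
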